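-- pv_equiv track=rewrite | github.com/cccorn/Q-ATPG | lib/libspd.py | pauli_str2int
-- ===== SOURCE A (Python) =====
-- def bin2int(x):
--     n=len(x)
--     result=[0 for ii in range(n)]
--     tmp1=1
--     result=0
--     for ii in range(n):
--         result+=tmp1*int(x[n-1-ii])
--         tmp1*=2
--     return result
--
-- def pauli_str2int(pauli):
--     n=len(pauli)
--     pauli_bin=[]
--     for ii in range(n):
--         if pauli[ii]=='I':
--             pauli_bin+=[0,0]
--         elif pauli[ii]=='Z':
--             pauli_bin+=[0,1]
--         elif pauli[ii]=='X':
--             pauli_bin+=[1,0]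
--         elif pauli[ii]=='Y':
--             pauli_bin+=[1,1]
--     return bin2int(pauli_bin)
-- ===== SOURCE B (Python) =====
-- _PAULI = {'I': 0, 'Z': 1, 'X': 2, 'Y': 3}
--
-- def pauli_str2int(pauli):
--     result = 0
--     for c in pauli:
--         d = _PAULI.get(c)
--         if d is not None:
--             result = result * 4 + d
--     return result
-- ===== Notes on version B (the rewrite author's own statement) =====
-- stated objective: simpler
-- what changed: Replaces A's two passes (build a 2n-entry bit list per character, then a weighted binary sum with an explicit power accumulator) by a single Horner-style pass that folds result = result*4 + digit over the characters via a lookup dict, with no intermediate list and no bin2int helper.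
import Mathlib
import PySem

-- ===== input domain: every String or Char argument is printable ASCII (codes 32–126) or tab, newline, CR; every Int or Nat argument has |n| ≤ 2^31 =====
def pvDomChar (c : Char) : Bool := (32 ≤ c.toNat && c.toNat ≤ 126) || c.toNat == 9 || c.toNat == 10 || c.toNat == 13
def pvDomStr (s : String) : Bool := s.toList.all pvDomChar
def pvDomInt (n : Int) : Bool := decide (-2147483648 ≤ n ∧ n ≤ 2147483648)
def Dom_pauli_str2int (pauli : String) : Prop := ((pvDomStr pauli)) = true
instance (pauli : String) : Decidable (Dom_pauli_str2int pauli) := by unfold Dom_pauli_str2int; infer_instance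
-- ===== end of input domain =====

-- B replaces A's bit-list-then-binary-sum two-pass scheme by one Horner fold result*4+digit over the characters (simpler, no intermediate list).

-- ===== PORT A =====
-- bin2int(x): weighted sum over the bits from the right, power accumulator tmp1.
-- (the initial 'result=[0]*n' list in the Python is dead: it is overwritten by 'result=0' before use)
-- indices n-1-ii are always in range, so pyGetD's default 0 is never read
def bin2int (x : List Int) : Int :=
  let n : Int := (x.length : Int)
  ((PySem.List.pyRange 0 n 1).foldl
      (fun (st : Int × Int) ii => (st.1 + st.2 * PySem.List.pyGetD x (n - 1 - ii) 0, st.2 * 2))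
      (0, 1)).1

-- indices ii ∈ range(n) are always in range of the string, so pyGetD's default is never read
def pauli_str2int (pauli : String) : Int :=
  let cs := pauli.toList
  let n : Int := (cs.length : Int)
  let pauli_bin : List Int :=
    (PySem.List.pyRange 0 n 1).foldl
      (fun (acc : List Int) ii =>
        if PySem.List.pyGetD cs ii ' ' = 'I' then acc ++ [0, 0]
        else if PySem.List.pyGetD cs ii ' ' = 'Z' then acc ++ [0, 1]
        else if PySem.List.pyGetD cs ii ' ' = 'X' then acc ++ [1, 0]
        else if PySem.List.pyGetD cs ii ' ' = 'Y' then acc ++ [1, 1]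
        else acc)
      []
  bin2int pauli_bin

-- ===== PORT B =====
def pauliDict : PySem.Dict Char Int := PySem.Dict.ofList [('I', 0), ('Z', 1), ('X', 2), ('Y', 3)]

def pauli_str2int_alt (pauli : String) : Int :=
  pauli.toList.foldl
    (fun (result : Int) c =>
      match PySem.Dict.get? pauliDict c with
      | some d => result * 4 + d
      | none => result)
    0

-- ===== PRECONDITION & SPEC =====
def Spec_pauli_str2int (pauli : String) (out : Int) : Prop := out = pauli_str2int_alt pauli
instance (pauli : String) (out : Int) : Decidable (Spec_pauli_str2int pauli out) := by unfold Spec_pauli_str2int; infer_instance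

-- ===== CLAIM (what is proved, stated in full; the proofs are below) =====
def Claim_equal_pauli_str2int : Prop := ∀ (pauli : String), Dom_pauli_str2int pauli → Spec_pauli_str2int pauli (pauli_str2int pauli)

-- ===== LEMMAS AND PROOFS =====

-- little-endian value of a bit list (head = least significant)
def leVal : List Int → Int
  | [] => 0
  | b :: t => b + 2 * leVal t

-- the bits A appends for one character (empty for unrecognised characters)
def encC (c : Char) : List Int :=
  if c = 'I' then [0, 0]
  else if c = 'Z' then [0, 1]
  else if c = 'X' then [1, 0]
  else if c = 'Y' then [1, 1]
  else []

theorem leVal_append (a b : List Int) :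
    leVal (a ++ b) = leVal a + 2 ^ a.length * leVal b := by
  induction a with
  | nil => simp [leVal]
  | cons x t ih => simp [leVal, ih, pow_succ]; ring

-- bin2int's fold over the reversed list computes (leVal, 2^length)
theorem bin2int_fold (l : List Int) (r t : Int) :
    (l.foldl (fun (st : Int × Int) b => (st.1 + st.2 * b, st.2 * 2)) (r, t)).1
      = r + t * leVal l := by
  induction l generalizing r t with
  | nil => simp [leVal]
  | cons b tl ih => simp [List.foldl_cons, ih, leVal]; ring

theorem bin2int_eq_leVal_reverse (x : List Int) :
    bin2int x = leVal x.reverse := by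
  simp only [bin2int]
  have hcongr :
      (PySem.List.pyRange 0 (x.length : Int) 1).foldl
        (fun (st : Int × Int) ii => (st.1 + st.2 * PySem.List.pyGetD x ((x.length : Int) - 1 - ii) 0, st.2 * 2)) (0, 1)
      = (PySem.List.pyRange 0 (x.length : Int) 1).foldl
        (fun (st : Int × Int) ii => (st.1 + st.2 * PySem.List.pyGetD x.reverse ii 0, st.2 * 2)) (0, 1) := by
    apply PySem.List.foldl_congr_mem
    intro st ii hmem
    have hb := (PySem.List.mem_pyRange_one).1 hmem
    have h0 : (0:Int) ≤ ii := hb.1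
    have h1 : ii < (x.length : Int) := hb.2
    have hlen : x.length ≠ 0 := by omega
    rw [PySem.List.pyGetD_eq_getElem x 0 (by omega) (by omega),
        PySem.List.pyGetD_eq_getElem x.reverse 0 (h0 := h0) (h1 := by simpa using h1)]
    have hidx : ((x.length : Int) - 1 - ii).toNat = x.length - 1 - ii.toNat := by omega
    simp [List.getElem_reverse, hidx]
  rw [hcongr]
  have := PySem.List.foldl_pyRange_zero_pyGetD'
    (f := fun (st : Int × Int) b => (st.1 + st.2 * b, st.2 * 2)) (xs := x.reverse) (d := 0)
    (init := ((0 : Int), (1 : Int)))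
  simp only [List.length_reverse] at this
  rw [this, bin2int_fold]
  ring

-- A's bit list is the flatMap of encC
theorem pauli_bin_eq_flatMap (cs : List Char) :
    (PySem.List.pyRange 0 (cs.length : Int) 1).foldl
      (fun (acc : List Int) ii =>
        if PySem.List.pyGetD cs ii ' ' = 'I' then acc ++ [0, 0]
        else if PySem.List.pyGetD cs ii ' ' = 'Z' then acc ++ [0, 1]
        else if PySem.List.pyGetD cs ii ' ' = 'X' then acc ++ [1, 0]
        else if PySem.List.pyGetD cs ii ' ' = 'Y' then acc ++ [1, 1]
        else acc)
      []
    = cs.flatMap encC := by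
  rw [PySem.List.foldl_pyRange_zero_pyGetD'
      (f := fun (acc : List Int) c =>
        if c = 'I' then acc ++ [0, 0]
        else if c = 'Z' then acc ++ [0, 1]
        else if c = 'X' then acc ++ [1, 0]
        else if c = 'Y' then acc ++ [1, 1]
        else acc) (xs := cs) (d := ' ') (init := ([] : List Int))]
  have hstep : (fun (acc : List Int) c =>
        if c = 'I' then acc ++ [0, 0]
        else if c = 'Z' then acc ++ [0, 1]
        else if c = 'X' then acc ++ [1, 0]
        else if c = 'Y' then acc ++ [1, 1]
        else acc) = fun (acc : List Int) c => acc ++ encC c := by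
    funext acc c
    unfold encC
    split_ifs <;> simp
  rw [hstep, PySem.List.foldl_append_eq_flatMap]
  simp

-- one character's contribution: prepending encC c under the big-endian fold is B's step
theorem beF_encC (c : Char) (r : Int) :
    (encC c).foldl (fun (a b : Int) => 2 * a + b) r
      = (match PySem.Dict.get? pauliDict c with
         | some d => r * 4 + d
         | none => r) := by
  have hd : pauliDict = PySem.Dict.mk [('I', 0), ('Z', 1), ('X', 2), ('Y', 3)] := by decide
  unfold encC
  by_cases hI : c = 'I'
  · subst hI; simp [hd, PySem.Dict.get?_mk_cons]; ring
  · by_cases hZ : c = 'Z'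
    · subst hZ; simp [hd, PySem.Dict.get?_mk_cons]; ring
    · by_cases hX : c = 'X'
      · subst hX; simp [hd, PySem.Dict.get?_mk_cons]; ring
      · by_cases hY : c = 'Y'
        · subst hY; simp [hd, PySem.Dict.get?_mk_cons]; ring
        · simp [hI, hZ, hX, hY, hd, beq_iff_eq,
            Ne.symm hI, Ne.symm hZ, Ne.symm hX, Ne.symm hY, PySem.Dict.get?]

-- big-endian fold vs little-endian value of the reverse
theorem beF_eq (l : List Int) (r : Int) :
    l.foldl (fun (a b : Int) => 2 * a + b) r = r * 2 ^ l.length + leVal l.reverse := by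
  induction l generalizing r with
  | nil => simp [leVal]
  | cons b t ih =>
    simp only [List.foldl_cons, ih, List.reverse_cons, leVal_append, List.length_cons,
      List.length_reverse, leVal]
    ring

theorem flatMap_fold (cs : List Char) (r : Int) :
    (cs.flatMap encC).foldl (fun (a b : Int) => 2 * a + b) r
      = cs.foldl
          (fun (result : Int) c =>
            match PySem.Dict.get? pauliDict c with
            | some d => result * 4 + d
            | none => result) r := by
  induction cs generalizing r with
  | nil => simp
  | cons c t ih =>
    simp only [List.flatMap_cons, List.foldl_append, List.foldl_cons]
    rw [beF_encC, ih]

-- ===== VERDICT (by name: the statement is the Claim_ definition above) =====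
theorem pauli_str2int_spec : Claim_equal_pauli_str2int := by
  intro pauli _
  simp only [Spec_pauli_str2int, pauli_str2int, pauli_str2int_alt]
  simp only [pauli_bin_eq_flatMap, bin2int_eq_leVal_reverse]
  have := beF_eq (pauli.toList.flatMap encC) 0
  simp only [zero_mul, zero_add] at this
  rw [← this, flatMap_fold]
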